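-- pv_equiv track=rewrite | github.com/joe-ucp/Quantum-Eye | src/quantum_eye/adapters/quantum_eye_adapter.py | _reduce_counts_to_qubits
-- ===== SOURCE A (Python) =====
-- from typing import Dict, Optional, Any, Union, List, Tuple
--
-- def _reduce_counts_to_qubits(counts: Dict[str, int], important_qubits: List[int]) -> Dict[str, int]:
--     """
--     Reduce measurement counts to focus only on important qubits.
--
--     Args:
--         counts: Original counts dictionary
--         important_qubits: List of important qubit indices to keep
--
--     Returns:
--         Reduced counts dictionary focusing only on important qubits
--     """
--     reduced_counts = {}
--
--     # Get total number of qubits from first key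
--     for bitstring in counts.keys():
--         num_qubits = len(bitstring)
--         break
--
--     # Process each measurement outcome
--     for bitstring, count in counts.items():
--         # Make sure bitstring has the right length
--         bitstring = bitstring.zfill(num_qubits)
--
--         # Extract bits for important qubits
--         # Note: Bitstrings are in reverse order compared to qubit indices
--         reduced_bits = ''.join(bitstring[num_qubits - 1 - q] for q in important_qubits)
--
--         # Add to reduced counts
--         if reduced_bits in reduced_counts:
--             reduced_counts[reduced_bits] += count
--         else:
--             reduced_counts[reduced_bits] = count
--
--     return reduced_counts
-- ===== SOURCE B (Python) =====
-- def _reduce_counts_to_qubits(counts, important_qubits):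
--     """Aggregate counts onto the important qubits: key every outcome once,
--     then build the result per distinct reduced key (first-seen order)."""
--     if not counts:
--         return {}
--     num_qubits = len(next(iter(counts)))
--     keyed = [
--         (''.join(b.zfill(num_qubits)[num_qubits - 1 - q] for q in important_qubits), c)
--         for b, c in counts.items()
--     ]
--     order = dict.fromkeys(k for k, _ in keyed)
--     return {k: sum(c for kk, c in keyed if kk == k) for k in order}
-- ===== Notes on version B (the rewrite author's own statement) =====
-- stated objective: alternative
-- what changed: Replaces A's incremental dict accumulation (membership test + add-or-insert per outcome) by a two-phase decomposition: key every outcome once into a (reduced_key, count) list, then build the result dict per distinct reduced key in first-seen order, summing each key's matching counts.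
import Mathlib
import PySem

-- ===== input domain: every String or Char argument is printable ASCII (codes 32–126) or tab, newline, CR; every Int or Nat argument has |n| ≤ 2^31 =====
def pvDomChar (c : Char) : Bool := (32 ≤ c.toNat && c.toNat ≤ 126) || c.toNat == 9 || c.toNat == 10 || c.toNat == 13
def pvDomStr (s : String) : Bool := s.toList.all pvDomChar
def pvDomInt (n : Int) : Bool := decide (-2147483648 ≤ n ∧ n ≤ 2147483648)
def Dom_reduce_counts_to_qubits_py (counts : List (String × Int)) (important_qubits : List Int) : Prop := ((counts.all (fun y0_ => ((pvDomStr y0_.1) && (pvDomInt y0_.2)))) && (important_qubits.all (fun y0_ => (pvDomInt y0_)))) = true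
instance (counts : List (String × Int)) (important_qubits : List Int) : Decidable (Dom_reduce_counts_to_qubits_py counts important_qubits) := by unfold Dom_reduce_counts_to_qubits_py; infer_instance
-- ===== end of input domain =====

-- B replaces A's incremental dict accumulation by keying every outcome once and
-- building the result per distinct reduced key (alternative decomposition, not faster).

-- ===== PORT A =====
-- shared key computation: ''.join(bitstring.zfill(n)[n - 1 - q] for q in important_qubits)
-- (identical expression in both Pythons; join of 1-char strings ported as String.ofList of the chars)
def pvRedKey (n : Int) (qs : List Int) (b : String) : String :=
  String.ofList (qs.map (fun q => PySem.List.pyGetD (PySem.Chars.zfill b.toList n) (n - 1 - q) '0'))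

def reduce_counts_to_qubits_py (counts : List (String × Int)) (important_qubits : List Int) : List (String × Int) :=
  match counts with
  | [] => []
  | (b0, _) :: _ =>
    let n : Int := PySem.Str.len b0
    (counts.foldl (fun (d : PySem.Dict String Int) p =>
        let rb := pvRedKey n important_qubits p.1
        if d.contains rb then d.insert rb (d.getD rb 0 + p.2) else d.insert rb p.2)
      PySem.Dict.empty).items

-- ===== PORT B =====
def reduce_counts_to_qubits_py_alt (counts : List (String × Int)) (important_qubits : List Int) : List (String × Int) :=
  match counts with
  | [] => []
  | (b0, _) :: _ =>
    let n : Int := PySem.Str.len b0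
    let keyed := counts.map (fun p => (pvRedKey n important_qubits p.1, p.2))
    (PySem.List.dedup (keyed.map (·.1))).map
      (fun k => (k, ((keyed.filter (fun p => p.1 == k)).map (·.2)).sum))

-- ===== PRECONDITION & SPEC =====
-- Pre_ excludes exactly the inputs where Python's indexing of the zfilled bitstring
-- raises IndexError (index n-1-q out of range, n = length of the first key).
def Pre_reduce_counts_to_qubits_py (counts : List (String × Int)) (important_qubits : List Int) : Prop :=
  ∀ h ∈ counts.head?, ∀ p ∈ counts, ∀ q ∈ important_qubits,
    PySem.Raise.InRange (max p.1.toList.length (PySem.Str.len h.1).toNat)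
      (PySem.Str.len h.1 - 1 - q)
instance (counts : List (String × Int)) (important_qubits : List Int) : Decidable (Pre_reduce_counts_to_qubits_py counts important_qubits) := by unfold Pre_reduce_counts_to_qubits_py; infer_instance

def pvWitness_reduce_counts_to_qubits_py : (List (String × Int)) × List Int :=
  ([("01", 3), ("11", 5), ("10", 2)], [0])

def Spec_reduce_counts_to_qubits_py (counts : List (String × Int)) (important_qubits : List Int) (out : List (String × Int)) : Prop := out = reduce_counts_to_qubits_py_alt counts important_qubits
instance (counts : List (String × Int)) (important_qubits : List Int) (out : List (String × Int)) : Decidable (Spec_reduce_counts_to_qubits_py counts important_qubits out) := by unfold Spec_reduce_counts_to_qubits_py; infer_instance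

-- ===== CLAIM (what is proved, stated in full; the proofs are below) =====
def Claim_equal_reduce_counts_to_qubits_py : Prop := ∀ (counts : List (String × Int)) (important_qubits : List Int), Dom_reduce_counts_to_qubits_py counts important_qubits → Pre_reduce_counts_to_qubits_py counts important_qubits → Spec_reduce_counts_to_qubits_py counts important_qubits (reduce_counts_to_qubits_py counts important_qubits)

-- ===== LEMMAS AND PROOFS =====

-- the accumulated value at key k after the grouping fold is the sum of the matching counts
lemma pvGetD_groupFold (l : List (String × Int)) (d : PySem.Dict String Int) (k : String) :
    (l.foldl (fun d p => d.insert p.1 (d.getD p.1 0 + p.2)) d).getD k 0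
      = d.getD k 0 + ((l.filter (fun p => p.1 == k)).map (·.2)).sum := by
  induction l generalizing d with
  | nil => simp
  | cons p l ih =>
    simp only [List.foldl_cons, ih, List.filter_cons]
    by_cases h : p.1 = k
    · simp [h]; ring
    · simp [h, PySem.Dict.getD_insert_of_ne _ _ _ (Ne.symm h)]

-- the grouping fold from the empty dict, as an items list
lemma pvItems_groupFold (l : List (String × Int)) :
    ((l.foldl (fun d p => d.insert p.1 (d.getD p.1 0 + p.2)) PySem.Dict.empty).items : List (String × Int))
      = (PySem.List.dedup (l.map (·.1))).map
          (fun k => (k, ((l.filter (fun p => p.1 == k)).map (·.2)).sum)) := by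
  have hnd : (l.foldl (fun d p => d.insert p.1 (d.getD p.1 0 + p.2)) PySem.Dict.empty).keys.Nodup := by
    have := PySem.Dict.nodup_keys_foldl_insert_key l (fun p => p.1)
      (fun d p => d.getD p.1 0 + p.2) PySem.Dict.empty (by simp)
    simpa using this
  have hkeys : (l.foldl (fun d p => d.insert p.1 (d.getD p.1 0 + p.2)) PySem.Dict.empty).keys
      = PySem.List.dedup (l.map (·.1)) := by
    have := PySem.Dict.keys_foldl_insert_key l (fun p => p.1)
      (fun d p => d.getD p.1 0 + p.2) PySem.Dict.empty
    simpa [PySem.Dict.keys_empty, PySem.Set.update_nil_left, PySem.List.dedup_eq_ofList] using this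
  rw [PySem.Dict.items_eq_map_keys _ hnd 0, hkeys]
  refine List.map_congr_left (fun k _ => ?_)
  rw [pvGetD_groupFold]
  simp

-- A's step (branching on membership) is the unconditional grouping step
lemma pvStep_eq (d : PySem.Dict String Int) (rb : String) (c : Int) :
    (if d.contains rb then d.insert rb (d.getD rb 0 + c) else d.insert rb c)
      = d.insert rb (d.getD rb 0 + c) := by
  by_cases h : d.contains rb = true
  · simp [h]
  · simp only [Bool.not_eq_true] at h
    simp [h, PySem.Dict.getD_of_not_contains _ _ h]

-- ===== VERDICT (by name: the statement is the Claim_ definition above) =====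
theorem reduce_counts_to_qubits_py_spec : Claim_equal_reduce_counts_to_qubits_py := by
  intro counts important_qubits _ _
  unfold Spec_reduce_counts_to_qubits_py
  cases counts with
  | nil => rfl
  | cons hd tl =>
    obtain ⟨b0, c0⟩ := hd
    simp only [reduce_counts_to_qubits_py, reduce_counts_to_qubits_py_alt]
    have hstep : ∀ (d : PySem.Dict String Int) (p : String × Int),
        (let rb := pvRedKey (PySem.Str.len b0) important_qubits p.1;
         if d.contains rb then d.insert rb (d.getD rb 0 + p.2) else d.insert rb p.2)
          = d.insert (pvRedKey (PySem.Str.len b0) important_qubits p.1)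
              (d.getD (pvRedKey (PySem.Str.len b0) important_qubits p.1) 0 + p.2) := by
      intro d p; exact pvStep_eq d _ p.2
    rw [List.foldl_ext _ _ _ (fun d p _ => hstep d p), ← List.foldl_map
      (f := fun p : String × Int => (pvRedKey (PySem.Str.len b0) important_qubits p.1, p.2))
      (g := fun (d : PySem.Dict String Int) (p : String × Int) => d.insert p.1 (d.getD p.1 0 + p.2)),
      pvItems_groupFold]
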